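-- pv_equiv track=rewrite | github.com/mikaelma/BigDPro | task6-1.py | longerLower
-- ===== SOURCE A (Python) =====
-- def longerLower(entries):
--     res = dict()
--     entries = entries.split()
--     for entry in entries:
--         if len(entry)>2 and entry.islower():
--             if entry not in res:
--                 res[entry] = 0
--             res[entry]+=1
--     return res
-- ===== SOURCE B (Python) =====
-- def longerLower(entries):
--     words = [w for w in entries.split() if len(w) > 2 and w.islower()]
--     return {w: words.count(w) for w in dict.fromkeys(words)}
-- ===== Notes on version B (the rewrite author's own statement) =====
-- stated objective: alternative
-- what changed: Replaces the single-pass incremental dict update with a filter-then-count strategy: build the filtered word list once, then a dict comprehension over its ordered distinct words counts each by list.count.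
import Mathlib
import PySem

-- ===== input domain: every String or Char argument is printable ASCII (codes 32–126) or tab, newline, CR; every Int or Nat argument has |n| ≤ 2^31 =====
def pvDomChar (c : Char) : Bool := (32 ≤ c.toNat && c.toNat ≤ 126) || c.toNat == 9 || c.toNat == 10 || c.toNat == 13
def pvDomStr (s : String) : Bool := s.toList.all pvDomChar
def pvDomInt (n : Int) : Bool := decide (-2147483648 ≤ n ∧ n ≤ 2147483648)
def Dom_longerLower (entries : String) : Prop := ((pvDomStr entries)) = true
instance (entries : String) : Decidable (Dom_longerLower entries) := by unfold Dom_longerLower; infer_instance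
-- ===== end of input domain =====

-- B replaces A's single-pass incremental dict update by filter-then-count over the distinct words (alternative decomposition, same values and key order).

-- shared primitive (no PySem equivalent): Python str.islower(), exact on the ASCII domain —
-- at least one cased (lowercase) character and no uppercase character
def pyStrIslower (s : String) : Bool :=
  s.toList.any PySem.Chars.islower && !(s.toList.any PySem.Chars.isupper)

-- shared primitive: the filter condition 'len(w) > 2 and w.islower()'
def pvQualifies (w : String) : Bool :=
  decide (PySem.Str.len w > 2) && pyStrIslower w

-- ===== PORT A =====
def longerLower (entries : String) : List (String × Int) :=
  let ws := PySem.Str.split₀ entries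
  (ws.foldl (fun (res : PySem.Dict String Int) entry =>
      if pvQualifies entry then
        let res' := if res.contains entry then res else res.insert entry 0
        res'.insert entry (res'.getD entry 0 + 1)
      else res) PySem.Dict.empty).items

-- ===== PORT B =====
def longerLower_alt (entries : String) : List (String × Int) :=
  let words := (PySem.Str.split₀ entries).filter pvQualifies
  (PySem.List.dedup words).map (fun w => (w, (words.count w : Int)))

-- ===== PRECONDITION & SPEC =====
def Spec_longerLower (entries : String) (out : List (String × Int)) : Prop := out = longerLower_alt entries
instance (entries : String) (out : List (String × Int)) : Decidable (Spec_longerLower entries out) := by unfold Spec_longerLower; infer_instance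

-- ===== CLAIM (what is proved, stated in full; the proofs are below) =====
def Claim_equal_longerLower : Prop := ∀ (entries : String), Dom_longerLower entries → Spec_longerLower entries (longerLower entries)

-- ===== LEMMAS AND PROOFS =====

-- A's two-step update ('insert 0 if absent, then += 1') is the one-step counting insert
theorem pv_step_eq (d : PySem.Dict String Int) (x : String) :
    (let r := if d.contains x then d else d.insert x 0
     r.insert x (r.getD x 0 + 1)) = d.insert x (d.getD x 0 + 1) := by
  by_cases h : d.contains x = true
  · simp [h]
  · rw [if_neg (by simp [h])]
    have hg : (d.insert x 0).getD x 0 = 0 := by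
      simp [PySem.Dict.getD_eq_get?_getD, PySem.Dict.get?_insert_self]
    have hd : d.getD x 0 = 0 :=
      PySem.Dict.getD_of_not_contains (d := d) (k := x) 0 (by simpa using h)
    show (d.insert x 0).insert x ((d.insert x 0).getD x 0 + 1) = _
    rw [hg, hd, PySem.Dict.insert_insert_self]

theorem longerLower_spec : Claim_equal_longerLower := by
  intro entries _
  unfold Spec_longerLower longerLower longerLower_alt
  have hfold :
      (PySem.Str.split₀ entries).foldl (fun (res : PySem.Dict String Int) entry =>
          if pvQualifies entry then
            let res' := if res.contains entry then res else res.insert entry 0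
            res'.insert entry (res'.getD entry 0 + 1)
          else res) PySem.Dict.empty
        = ((PySem.Str.split₀ entries).filter pvQualifies).foldl
            (fun (res : PySem.Dict String Int) entry => res.insert entry (res.getD entry 0 + 1))
            PySem.Dict.empty := by
    rw [← List.foldl_filter]
    apply PySem.List.foldl_congr_mem
    intro acc x _
    exact pv_step_eq acc x
  simp only [hfold, PySem.Dict.foldl_insert_getD_add_one_eq_counter,
    PySem.Dict.items_counter, PySem.List.dedup_eq_ofList]

-- ===== VERDICT (by name: the statement is the Claim_ definition above) =====
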